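-- pv_equiv track=rewrite | github.com/edwardslab-wustl/me-class2 | meclass2/interpolation.py | get_max_min_from_list
-- ===== SOURCE A (Python) =====
-- def get_max_min_from_list(roi_list):
--     ret_list = list()
--     for roi in roi_list:
--         if roi[0] == -1 or roi[1] == -1:
--             continue
--         else:
--             ret_list.append(roi[0])
--             ret_list.append(roi[1])
--     return (max(ret_list),min(ret_list))
-- ===== SOURCE B (Python) =====
-- def get_max_min_from_list(roi_list):
--     cur_max = None
--     cur_min = None
--     for roi in roi_list:
--         if roi[0] == -1 or roi[1] == -1:
--             continue
--         for v in (roi[0], roi[1]):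
--             if cur_max is None or v > cur_max:
--                 cur_max = v
--             if cur_min is None or v < cur_min:
--                 cur_min = v
--     return (cur_max, cur_min)
-- ===== Notes on version B (the rewrite author's own statement) =====
-- stated objective: simpler
-- what changed: Replaces building an intermediate value list and scanning it twice with max() and min() by a single pass maintaining running cur_max/cur_min; Pre_ excludes inputs where every roi is filtered out, on which A raises ValueError from max([]) while B returns (None, None).
-- outside the precondition, e.g. on get_max_min_from_list([]): A raises ValueError, B returns (None, None)
import Mathlib
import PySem

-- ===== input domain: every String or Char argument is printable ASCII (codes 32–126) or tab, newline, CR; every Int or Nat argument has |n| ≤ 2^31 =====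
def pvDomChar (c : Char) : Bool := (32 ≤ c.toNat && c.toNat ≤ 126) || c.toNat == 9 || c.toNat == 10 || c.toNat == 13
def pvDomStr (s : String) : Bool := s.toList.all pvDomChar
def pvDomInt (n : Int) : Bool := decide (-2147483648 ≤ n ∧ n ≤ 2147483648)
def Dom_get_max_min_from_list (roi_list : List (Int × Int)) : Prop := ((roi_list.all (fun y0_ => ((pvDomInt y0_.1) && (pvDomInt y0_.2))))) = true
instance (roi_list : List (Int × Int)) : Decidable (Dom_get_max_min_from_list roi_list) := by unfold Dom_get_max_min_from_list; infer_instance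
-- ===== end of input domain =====

-- B replaces the build-a-list-then-max/min pass with one pass keeping running cur_max/cur_min (simpler, O(1) extra space).


-- ===== PORT A =====
-- ret_list built by appending both components of every unfiltered roi; then (max, min).
-- max([])/min([]) raise ValueError in Python: those inputs are excluded by Pre_ below; .getD 0 is never reached on Pre_.
def get_max_min_from_list (roi_list : List (Int × Int)) : Int × Int :=
  let ret_list := roi_list.foldl
    (fun acc roi => if roi.1 = -1 ∨ roi.2 = -1 then acc else acc ++ [roi.1, roi.2]) []
  ((PySem.List.max? ret_list (fun x => x)).getD 0, (PySem.List.min? ret_list (fun x => x)).getD 0)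

-- ===== PORT B =====
-- update the running (cur_max, cur_min) pair of Options with one value v
def upd (st : Option Int × Option Int) (v : Int) : Option Int × Option Int :=
  ((match st.1 with | none => some v | some m => if v > m then some v else some m),
   (match st.2 with | none => some v | some m => if v < m then some v else some m))

-- one pass over roi_list; skip filtered rois, feed both components through upd.
-- Python B returns (None, None) when no valid roi was seen (outside Pre_); .getD 0 is never reached on Pre_.
def get_max_min_from_list_alt (roi_list : List (Int × Int)) : Int × Int :=
  let st := roi_list.foldl
    (fun st roi => if roi.1 = -1 ∨ roi.2 = -1 then st else [roi.1, roi.2].foldl upd st)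
    (none, none)
  (st.1.getD 0, st.2.getD 0)

-- ===== PRECONDITION & SPEC =====
-- Pre_ excludes exactly the inputs where every roi is filtered out: there Python A raises
-- ValueError from max([]) (and Python B returns (None, None), not an Int pair).
def Pre_get_max_min_from_list (roi_list : List (Int × Int)) : Prop :=
  ∃ roi ∈ roi_list, ¬(roi.1 = -1 ∨ roi.2 = -1)
instance (roi_list : List (Int × Int)) : Decidable (Pre_get_max_min_from_list roi_list) := by
  unfold Pre_get_max_min_from_list; infer_instance

def pvWitness_get_max_min_from_list : (List (Int × Int)) := [(2, 5), (-1, 3)]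

def Spec_get_max_min_from_list (roi_list : List (Int × Int)) (out : Int × Int) : Prop := out = get_max_min_from_list_alt roi_list
instance (roi_list : List (Int × Int)) (out : Int × Int) : Decidable (Spec_get_max_min_from_list roi_list out) := by unfold Spec_get_max_min_from_list; infer_instance

-- ===== CLAIM (what is proved, stated in full; the proofs are below) =====
def Claim_equal_get_max_min_from_list : Prop := ∀ (roi_list : List (Int × Int)), Dom_get_max_min_from_list roi_list → Pre_get_max_min_from_list roi_list → Spec_get_max_min_from_list roi_list (get_max_min_from_list roi_list)

-- ===== LEMMAS AND PROOFS =====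

-- the values each roi contributes to A's ret_list
def gvals (roi : Int × Int) : List Int :=
  if roi.1 = -1 ∨ roi.2 = -1 then [] else [roi.1, roi.2]

lemma afold_eq_flatMap (l : List (Int × Int)) (acc : List Int) :
    l.foldl (fun acc roi => if roi.1 = -1 ∨ roi.2 = -1 then acc else acc ++ [roi.1, roi.2]) acc
      = acc ++ l.flatMap gvals := by
  induction l generalizing acc with
  | nil => simp
  | cons r t ih =>
      by_cases h : r.1 = -1 ∨ r.2 = -1 <;> simp [gvals, h, ih]

-- B's pass over roi_list is the pass of upd over the flattened value list
lemma bfold_eq_flatMap (l : List (Int × Int)) (st : Option Int × Option Int) :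
    l.foldl (fun st roi => if roi.1 = -1 ∨ roi.2 = -1 then st else [roi.1, roi.2].foldl upd st) st
      = (l.flatMap gvals).foldl upd st := by
  induction l generalizing st with
  | nil => simp
  | cons r t ih =>
      rw [List.flatMap_cons, List.foldl_cons, ih, List.foldl_append]
      congr 1
      by_cases h : r.1 = -1 ∨ r.2 = -1 <;> simp [gvals, h]

lemma upd_some (M m v : Int) : upd (some M, some m) v = (some (max M v), some (min m v)) := by
  simp only [upd, max_def, min_def, Prod.mk.injEq]
  constructor <;> split_ifs <;> first | rfl | (simp only [Option.some.injEq]; omega)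

lemma updfold_some (vals : List Int) (M m : Int) :
    vals.foldl upd (some M, some m) = (some (vals.foldl max M), some (vals.foldl min m)) := by
  induction vals generalizing M m with
  | nil => rfl
  | cons v t ih => simp [upd_some, ih]

lemma flatMap_ne_nil_of_pre (l : List (Int × Int)) (h : Pre_get_max_min_from_list l) :
    l.flatMap gvals ≠ [] := by
  obtain ⟨r, hr, hne⟩ := h
  intro hnil
  have := List.flatMap_eq_nil_iff.1 hnil r hr
  simp [gvals, hne] at this

-- ===== VERDICT (by name: the statement is the Claim_ definition above) =====
theorem get_max_min_from_list_spec : Claim_equal_get_max_min_from_list := by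
  intro l _ hpre
  unfold Spec_get_max_min_from_list get_max_min_from_list get_max_min_from_list_alt
  rw [bfold_eq_flatMap, afold_eq_flatMap]
  cases hv : l.flatMap gvals with
  | nil => exact absurd hv (flatMap_ne_nil_of_pre l hpre)
  | cons x t =>
      simp only [List.foldl_cons, List.nil_append]
      have : upd (none, none) x = (some x, some x) := rfl
      rw [this, updfold_some]
      simp [PySem.List.max?_id_cons, PySem.List.min?_id_cons]
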